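-- pv_equiv track=rewrite | github.com/orencWaves/instl | pyinstl/utils.py | gen_col_format
-- ===== SOURCE A (Python) =====
-- def gen_col_format(width_list):
--     """ generate a list of format string where each position is aligned to the adjacent
--         position in the width_list.
--     """
--     retVal = list()
--     format_str = ""
--     retVal.append(format_str)
--     for width in width_list:
--         format_str += "{{:<{width}}}".format(width=width+1)
--         retVal.append(format_str)
--     return retVal
-- ===== SOURCE B (Python) =====
-- def gen_col_format(width_list):
--     pieces = ["{{:<{}}}".format(width + 1) for width in width_list]
--     return ["".join(pieces[:i]) for i in range(len(pieces) + 1)]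
-- ===== Notes on version B (the rewrite author's own statement) =====
-- stated objective: alternative
-- what changed: Replaces the running string accumulator with a two-stage decomposition: first map each width to its per-column piece, then produce each output element independently as the join of a slice of the pieces list.
import Mathlib
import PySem

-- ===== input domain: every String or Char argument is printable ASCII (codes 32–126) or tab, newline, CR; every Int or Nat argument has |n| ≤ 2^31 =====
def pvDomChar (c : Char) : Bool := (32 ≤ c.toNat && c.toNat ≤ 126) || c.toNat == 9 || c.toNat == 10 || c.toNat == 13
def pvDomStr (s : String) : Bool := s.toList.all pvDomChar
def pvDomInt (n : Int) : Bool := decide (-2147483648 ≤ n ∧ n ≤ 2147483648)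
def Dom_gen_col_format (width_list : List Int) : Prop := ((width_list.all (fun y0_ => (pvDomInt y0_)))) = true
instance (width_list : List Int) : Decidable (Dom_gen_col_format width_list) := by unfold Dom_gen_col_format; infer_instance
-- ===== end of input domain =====

-- ===== PORT A =====
-- A: running accumulator; at each width, append the new piece to format_str and record it
def gen_col_format (width_list : List Int) : List String :=
  (width_list.foldl
    (fun (st : List String × String) width =>
      let format_str := st.2 ++ "{:<" ++ PySem.Int.toStr (width + 1) ++ "}"
      (st.1 ++ [format_str], format_str))
    ([""], "")).1

-- ===== PORT B =====
-- B: map widths to pieces, then each output element is the join of a prefix of the pieces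
def gen_col_format_alt (width_list : List Int) : List String :=
  let pieces := width_list.map (fun width => "{:<" ++ PySem.Int.toStr (width + 1) ++ "}")
  (List.range (pieces.length + 1)).map (fun i => String.join (pieces.take i))

-- ===== PRECONDITION & SPEC =====
def Spec_gen_col_format (width_list : List Int) (out : List String) : Prop := out = gen_col_format_alt width_list
instance (width_list : List Int) (out : List String) : Decidable (Spec_gen_col_format width_list out) := by unfold Spec_gen_col_format; infer_instance

-- ===== CLAIM (what is proved, stated in full; the proofs are below) =====
def Claim_equal_gen_col_format : Prop := ∀ (width_list : List Int), Dom_gen_col_format width_list → Spec_gen_col_format width_list (gen_col_format width_list)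

-- ===== LEMMAS AND PROOFS =====

-- ===== VERDICT (by name: the statement is the Claim_ definition above) =====
-- String.join is a foldl; these rewrite it recursively.
theorem str_join_nil : String.join ([] : List String) = "" := rfl

theorem str_foldl_append (l : List String) : ∀ a : String,
    l.foldl (· ++ ·) a = a ++ String.join l := by
  induction l with
  | nil => intro a; rw [str_join_nil]; simp
  | cons p l ih =>
    intro a
    rw [List.foldl_cons, ih]
    have h : String.join (p :: l) = p ++ String.join l := by
      show List.foldl (· ++ ·) ("" ++ p) l = _
      rw [ih]; simp
    rw [h, String.append_assoc]

theorem str_join_cons (p : String) (ps : List String) :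
    String.join (p :: ps) = p ++ String.join ps := by
  show List.foldl (· ++ ·) ("" ++ p) ps = _
  rw [str_foldl_append]; simp

-- The A-side fold over an arbitrary piece list, with general accumulator.
theorem foldA_eq (ps : List String) : ∀ (L : List String) (s : String),
    (ps.foldl (fun (st : List String × String) p => (st.1 ++ [st.2 ++ p], st.2 ++ p)) (L, s)).1
      = L ++ (List.range ps.length).map (fun i => s ++ String.join (ps.take (i + 1))) := by
  induction ps with
  | nil => intro L s; simp
  | cons p ps ih =>
    intro L s
    simp only [List.foldl_cons, ih, List.length_cons, List.range_succ_eq_map,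
      List.map_cons, List.map_map, List.take_succ_cons, str_join_cons]
    simp [List.append_assoc, Function.comp, String.append_assoc, str_join_nil]

theorem gen_col_format_spec : Claim_equal_gen_col_format := by
  intro wl _
  unfold Spec_gen_col_format gen_col_format gen_col_format_alt
  have hfold : wl.foldl
      (fun (st : List String × String) width =>
        let format_str := st.2 ++ "{:<" ++ PySem.Int.toStr (width + 1) ++ "}"
        (st.1 ++ [format_str], format_str))
      ([""], "")
    = (wl.map (fun width => "{:<" ++ PySem.Int.toStr (width + 1) ++ "}")).foldl
        (fun (st : List String × String) p => (st.1 ++ [st.2 ++ p], st.2 ++ p)) ([""], "") := by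
    rw [List.foldl_map]
    simp [String.append_assoc]
  rw [hfold, foldA_eq]
  simp only [List.length_map, List.range_succ_eq_map, List.map_cons, List.map_map,
    List.take_zero, str_join_nil]
  simp [Function.comp]
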